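-- pv_equiv track=rewrite | github.com/aarbys/EGE-TRAINER | eighteen.py | solution_medium
-- ===== SOURCE A (Python) =====
-- def create_main_table(a_o_l):
--     sol_table = []
--     for i in range(a_o_l):
--         line = []
--         for j in range(a_o_l):
--             line.append(0)
--         sol_table.append(line)
--     return sol_table
--
-- def solution_medium(table: ' Excel table', a_o_l, psih: ' Variable divider'):
--     answer = []
--     solution_table = create_main_table(
--         a_o_l)  # Table with full solution of this problem like a solution table[NUMBER][LETTER]
--
--     if table[0][0] % psih == 0:
--         solution_table[0][0] = table[0][0]
--     else:
--         solution_table[0][0] = 0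
--     for i in range(1, a_o_l):
--         if table[i][0] % psih == 0:
--             solution_table[i][0] = solution_table[i - 1][0] + table[i][0]
--         else:
--             solution_table[i][0] = solution_table[i - 1][0]
--         if table[0][i] % psih == 0:
--             solution_table[0][i] = solution_table[0][i - 1] + table[0][i]
--         else:
--             solution_table[0][i] = solution_table[0][i - 1]
--
--     for i in range(1, a_o_l):
--         for j in range(1, a_o_l):
--             if table[i][j] % psih == 0:
--                 solution_table[i][j] = max(solution_table[i - 1][j], solution_table[i][j - 1]) + table[i][j]
--             else:
--                 solution_table[i][j] = max(solution_table[i - 1][j], solution_table[i][j - 1])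
--
--     answer.append(solution_table[-1][-1])  # Adding to correct answer first value for this problem
--     for i in range(1, a_o_l):
--         for j in range(1, a_o_l):
--             if table[i][j] % psih == 0:
--                 solution_table[i][j] = min(solution_table[i - 1][j], solution_table[i][j - 1]) + table[i][j]
--             else:
--                 solution_table[i][j] = min(solution_table[i - 1][j], solution_table[i][j - 1])
--
--     answer.append(solution_table[-1][-1])  # Adding to correct answer seconde value for this problem
--     return answer
-- ===== SOURCE B (Python) =====
-- def solution_medium(table: ' Excel table', a_o_l, psih: ' Variable divider'):
--     # One fused pass: a rolling row of (max, min) pairs instead of a full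
--     # grid mutated by separate max- and min-passes.  O(n) memory.
--     prev = []
--     for i in range(a_o_l):
--         row = []
--         for j in range(a_o_l):
--             v = table[i][j]
--             if i == 0 and j == 0:
--                 c = v if v % psih == 0 else 0
--                 cell = (c, c)
--             elif i == 0:
--                 mx, mn = row[j - 1]
--                 cell = (mx + v, mn + v) if v % psih == 0 else (mx, mn)
--             elif j == 0:
--                 mx, mn = prev[0]
--                 cell = (mx + v, mn + v) if v % psih == 0 else (mx, mn)
--             else:
--                 mx = max(prev[j][0], row[j - 1][0])
--                 mn = min(prev[j][1], row[j - 1][1])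
--                 cell = (mx + v, mn + v) if v % psih == 0 else (mx, mn)
--             row.append(cell)
--         prev = row
--     return [prev[-1][0], prev[-1][1]]
-- ===== Notes on version B (the rewrite author's own statement) =====
-- stated objective: alternative
-- what changed: B replaces A's full n x n grid, separate border loop and two sequential overwriting max/min passes by one fused row-by-row pass that keeps only a rolling row of (max,min) pairs, using O(n) memory instead of O(n^2).
import Mathlib
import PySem

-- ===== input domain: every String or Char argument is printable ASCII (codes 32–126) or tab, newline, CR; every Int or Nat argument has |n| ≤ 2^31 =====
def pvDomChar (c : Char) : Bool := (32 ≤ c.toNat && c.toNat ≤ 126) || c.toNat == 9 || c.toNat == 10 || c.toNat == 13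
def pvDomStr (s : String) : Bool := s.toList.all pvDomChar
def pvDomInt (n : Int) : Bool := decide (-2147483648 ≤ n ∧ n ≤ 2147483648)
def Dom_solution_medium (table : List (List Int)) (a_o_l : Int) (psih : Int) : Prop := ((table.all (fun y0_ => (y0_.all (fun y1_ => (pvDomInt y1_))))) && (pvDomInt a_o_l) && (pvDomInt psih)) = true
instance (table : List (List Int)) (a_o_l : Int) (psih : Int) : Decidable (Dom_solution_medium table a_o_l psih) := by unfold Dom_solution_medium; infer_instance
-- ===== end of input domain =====

-- B fuses A's two overwriting max/min DP passes into one row-by-row pass over a rolling row of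
-- (max, min) pairs (O(n) memory instead of a full mutated n×n grid); same return value on Pre_.

-- ===== PORT A =====
-- table[i][j] (indices in range under Pre_)
def pvT (table : List (List Int)) (i j : Nat) : Int := (table.getD i []).getD j 0
-- solution_table[i][j] read / in-place write of the mutable list-of-lists grid
def pvGet (g : List (List Int)) (i j : Nat) : Int := (g.getD i []).getD j 0
def pvSet (g : List (List Int)) (i j : Nat) (v : Int) : List (List Int) :=
  g.set i ((g.getD i []).set j v)
-- the pattern 'acc + v if v % psih == 0 else acc' shared by every branch of A
def pvDstep (p v acc : Int) : Int := if PySem.Int.mod v p = 0 then acc + v else acc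
-- one iteration of A's first loop: sets solution_table[i][0] then solution_table[0][i]
def pvBorderBody (t : Nat → Nat → Int) (p : Int) (g : List (List Int)) (i : Nat) :
    List (List Int) :=
  let g' := pvSet g i 0 (pvDstep p (t i 0) (pvGet g (i-1) 0))
  pvSet g' 0 i (pvDstep p (t 0 i) (pvGet g' 0 (i-1)))
-- one inner-loop iteration of a max/min pass (comb = max or min)
def pvCellBody (t : Nat → Nat → Int) (p : Int) (comb : Int → Int → Int) (i : Nat)
    (g : List (List Int)) (j : Nat) : List (List Int) :=
  pvSet g i j (pvDstep p (t i j) (comb (pvGet g (i-1) j) (pvGet g i (j-1))))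
-- one outer-loop iteration of a pass: the inner loop over j = 1..m
def pvPassBody (t : Nat → Nat → Int) (p : Int) (comb : Int → Int → Int) (m : Nat)
    (g : List (List Int)) (i : Nat) : List (List Int) :=
  (List.range' 1 m).foldl (pvCellBody t p comb i) g

def solution_medium (table : List (List Int)) (a_o_l : Int) (psih : Int) : List Int :=
  let n := a_o_l.toNat
  let t := pvT table
  let m := n - 1                 -- range(1, a_o_l) has n-1 elements
  -- create_main_table(a_o_l): the n×n grid of zeros
  let g1 := pvSet (List.replicate n (List.replicate n 0)) 0 0
    (if PySem.Int.mod (t 0 0) psih = 0 then t 0 0 else 0)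
  let g2 := (List.range' 1 m).foldl (pvBorderBody t psih) g1
  let g3 := (List.range' 1 m).foldl (pvPassBody t psih max m) g2
  let ans1 := pvGet g3 (n-1) (n-1)     -- solution_table[-1][-1]; index n-1 under Pre_ (n ≥ 1)
  let g4 := (List.range' 1 m).foldl (pvPassBody t psih min m) g3
  [ans1, pvGet g4 (n-1) (n-1)]

-- ===== PORT B =====
-- one cell of B's fused pass: the (max, min) pair at (i, j) from the rolling rows prev / row
def pvBCell (t : Nat → Nat → Int) (psih : Int) (i : Nat) (prev row : List (Int × Int))
    (j : Nat) : Int × Int :=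
  let v := t i j
  if i = 0 ∧ j = 0 then
    let c := if PySem.Int.mod v psih = 0 then v else 0
    (c, c)
  else if i = 0 then
    let p := row.getD (j-1) (0, 0)
    if PySem.Int.mod v psih = 0 then (p.1 + v, p.2 + v) else p
  else if j = 0 then
    let p := prev.getD 0 (0, 0)
    if PySem.Int.mod v psih = 0 then (p.1 + v, p.2 + v) else p
  else
    let mx := max (prev.getD j (0, 0)).1 (row.getD (j-1) (0, 0)).1
    let mn := min (prev.getD j (0, 0)).2 (row.getD (j-1) (0, 0)).2
    if PySem.Int.mod v psih = 0 then (mx + v, mn + v) else (mx, mn)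

def solution_medium_alt (table : List (List Int)) (a_o_l : Int) (psih : Int) : List Int :=
  let n := a_o_l.toNat
  let t := pvT table
  let last := (List.range n).foldl
    (fun prev i => (List.range n).foldl (fun row j => row ++ [pvBCell t psih i prev row j]) []) []
  let c := PySem.List.pyGetD last (-1) (0, 0)     -- prev[-1]; defined under Pre_ (n ≥ 1)
  [c.1, c.2]

-- ===== PRECONDITION & SPEC =====
-- Pre_ excludes exactly the inputs where the Python A raises: psih = 0 (ZeroDivisionError) and
-- a_o_l < 1 or a table with fewer than a_o_l rows / a used row shorter than a_o_l (IndexError).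
def Pre_solution_medium (table : List (List Int)) (a_o_l : Int) (psih : Int) : Prop :=
  psih ≠ 0 ∧ 1 ≤ a_o_l ∧ a_o_l.toNat ≤ table.length ∧
    ∀ row ∈ table.take a_o_l.toNat, a_o_l.toNat ≤ row.length
instance (table : List (List Int)) (a_o_l : Int) (psih : Int) : Decidable (Pre_solution_medium table a_o_l psih) := by unfold Pre_solution_medium; infer_instance

def pvWitness_solution_medium : List (List Int) × Int × Int := ([[2, 3], [4, 6]], 2, 2)

def Spec_solution_medium (table : List (List Int)) (a_o_l : Int) (psih : Int) (out : List Int) : Prop := out = solution_medium_alt table a_o_l psih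
instance (table : List (List Int)) (a_o_l : Int) (psih : Int) (out : List Int) : Decidable (Spec_solution_medium table a_o_l psih out) := by unfold Spec_solution_medium; infer_instance

-- ===== CLAIM (what is proved, stated in full; the proofs are below) =====
def Claim_equal_solution_medium : Prop := ∀ (table : List (List Int)) (a_o_l : Int) (psih : Int), Dom_solution_medium table a_o_l psih → Pre_solution_medium table a_o_l psih → Spec_solution_medium table a_o_l psih (solution_medium table a_o_l psih)

-- ===== LEMMAS AND PROOFS =====

theorem pv_range'_concat (k : Nat) : List.range' 1 (k+1) = List.range' 1 k ++ [k+1] := by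
  have h := @List.range'_concat 1 1 k
  rw [show 1 + 1 * k = k + 1 from by omega] at h
  exact h

-- reference DP: the common value both programs compute (comb = max or min)
def pvDP (t : Nat → Nat → Int) (p : Int) (comb : Int → Int → Int) : Nat → Nat → Int
  | 0, 0 => pvDstep p (t 0 0) 0
  | 0, j+1 => pvDstep p (t 0 (j+1)) (pvDP t p comb 0 j)
  | i+1, 0 => pvDstep p (t (i+1) 0) (pvDP t p comb i 0)
  | i+1, j+1 => pvDstep p (t (i+1) (j+1)) (comb (pvDP t p comb i (j+1)) (pvDP t p comb (i+1) j))
  termination_by i j => (i, j)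

-- equation lemmas for pvDP
theorem pvDP_eq_00 (t : Nat → Nat → Int) (p : Int) (comb : Int → Int → Int) :
    pvDP t p comb 0 0 = pvDstep p (t 0 0) 0 := by simp [pvDP]
theorem pvDP_eq_0S (t : Nat → Nat → Int) (p : Int) (comb : Int → Int → Int) (j : Nat) :
    pvDP t p comb 0 (j+1) = pvDstep p (t 0 (j+1)) (pvDP t p comb 0 j) := by simp [pvDP]
theorem pvDP_eq_S0 (t : Nat → Nat → Int) (p : Int) (comb : Int → Int → Int) (i : Nat) :
    pvDP t p comb (i+1) 0 = pvDstep p (t (i+1) 0) (pvDP t p comb i 0) := by simp [pvDP]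
theorem pvDP_eq_SS (t : Nat → Nat → Int) (p : Int) (comb : Int → Int → Int) (i j : Nat) :
    pvDP t p comb (i+1) (j+1) =
      pvDstep p (t (i+1) (j+1)) (comb (pvDP t p comb i (j+1)) (pvDP t p comb (i+1) j)) := by
  simp [pvDP]

-- grid shape: n rows of length n
def pvShape (n : Nat) (g : List (List Int)) : Prop :=
  g.length = n ∧ ∀ k, k < n → (g.getD k []).length = n

theorem pvShape_set (n : Nat) (g : List (List Int)) (i j : Nat) (v : Int)
    (h : pvShape n g) (hi : i < n) : pvShape n (pvSet g i j v) := by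
  obtain ⟨hlen, hrows⟩ := h
  refine ⟨by simp [pvSet, hlen], ?_⟩
  intro k hk
  unfold pvSet
  by_cases hki : k = i
  · subst hki
    rw [List.getD_eq_getElem?_getD, List.getElem?_set_self (by omega), Option.getD_some,
        List.length_set]
    exact hrows k hk
  · rw [List.getD_eq_getElem?_getD, List.getElem?_set_ne (by omega),
        ← List.getD_eq_getElem?_getD]
    exact hrows k hk

theorem pvGet_set (n : Nat) (g : List (List Int)) (i j : Nat) (v : Int)
    (h : pvShape n g) (hi : i < n) (hj : j < n) (a b : Nat) :
    pvGet (pvSet g i j v) a b = if a = i ∧ b = j then v else pvGet g a b := by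
  obtain ⟨hlen, hrows⟩ := h
  have hrow : (g.getD i []).length = n := hrows i hi
  unfold pvGet pvSet
  by_cases hai : a = i
  · rw [hai]
    rw [List.getD_eq_getElem?_getD (l := g.set i ((g.getD i []).set j v)),
        List.getElem?_set_self (by omega), Option.getD_some]
    by_cases hbj : b = j
    · rw [hbj, if_pos ⟨rfl, rfl⟩, List.getD_eq_getElem?_getD,
          List.getElem?_set_self (by omega), Option.getD_some]
    · rw [if_neg (by tauto), List.getD_eq_getElem?_getD,
          List.getElem?_set_ne (by omega), ← List.getD_eq_getElem?_getD]
  · rw [if_neg (by tauto), List.getD_eq_getElem?_getD (l := g.set i ((g.getD i []).set j v)),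
        List.getElem?_set_ne (by omega), ← List.getD_eq_getElem?_getD]

theorem pvShape_replicate (n : Nat) : pvShape n (List.replicate n (List.replicate n (0:Int))) := by
  refine ⟨by simp, ?_⟩
  intro k hk
  rw [List.getD_eq_getElem?_getD, List.getElem?_replicate, if_pos hk, Option.getD_some]
  simp

theorem pvGet_replicate (n a b : Nat) :
    pvGet (List.replicate n (List.replicate n (0:Int))) a b = 0 := by
  unfold pvGet
  rw [List.getD_eq_getElem?_getD (l := List.replicate n (List.replicate n (0:Int))),
      List.getElem?_replicate]
  split_ifs
  · rw [Option.getD_some, List.getD_eq_getElem?_getD, List.getElem?_replicate]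
    split_ifs <;> simp
  · simp

theorem pvShape_foldl {α : Type} (n : Nat) (body : List (List Int) → α → List (List Int))
    (l : List α) (hbody : ∀ g x, x ∈ l → pvShape n g → pvShape n (body g x)) :
    ∀ g, pvShape n g → pvShape n (l.foldl body g) := by
  induction l with
  | nil => intro g hg; simpa using hg
  | cons x l ih =>
    intro g hg
    rw [List.foldl_cons]
    exact ih (fun g' y hy hg' => hbody g' y (List.mem_cons_of_mem x hy) hg')
      (body g x) (hbody g x List.mem_cons_self hg)

theorem pvShape_borderBody (t : Nat → Nat → Int) (p : Int) (n i : Nat) (hi : i < n)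
    (g : List (List Int)) (hg : pvShape n g) (hn : 1 ≤ n) :
    pvShape n (pvBorderBody t p g i) := by
  unfold pvBorderBody
  exact pvShape_set n _ 0 i _ (pvShape_set n g i 0 _ hg hi) (by omega)

theorem pvShape_cellBody (t : Nat → Nat → Int) (p : Int) (comb : Int → Int → Int)
    (n i j : Nat) (hi : i < n) (g : List (List Int)) (hg : pvShape n g) :
    pvShape n (pvCellBody t p comb i g j) :=
  pvShape_set n g i j _ hg hi

theorem pvShape_passBody (t : Nat → Nat → Int) (p : Int) (comb : Int → Int → Int)
    (n m i : Nat) (hi : i < n) (g : List (List Int)) (hg : pvShape n g) :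
    pvShape n (pvPassBody t p comb m g i) := by
  unfold pvPassBody
  exact pvShape_foldl n _ _ (fun g' j _ hg' => pvShape_cellBody t p comb n i j hi g' hg') g hg

-- characterization of A's grid after the border loop (over range' 1 k)
theorem pv_border_char (t : Nat → Nat → Int) (p : Int) (comb : Int → Int → Int)
    (n : Nat) (hn : 1 ≤ n) (k : Nat) (hk : k < n) :
    ∀ a b, pvGet ((List.range' 1 k).foldl (pvBorderBody t p)
        (pvSet (List.replicate n (List.replicate n 0)) 0 0
          (if PySem.Int.mod (t 0 0) p = 0 then t 0 0 else 0))) a b =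
      if a = 0 ∧ b = 0 then pvDP t p comb 0 0
      else if b = 0 ∧ 1 ≤ a ∧ a ≤ k then pvDP t p comb a 0
      else if a = 0 ∧ 1 ≤ b ∧ b ≤ k then pvDP t p comb 0 b
      else 0 := by
  have hshape1 : pvShape n (pvSet (List.replicate n (List.replicate n 0)) 0 0
      (if PySem.Int.mod (t 0 0) p = 0 then t 0 0 else 0)) :=
    pvShape_set n _ 0 0 _ (pvShape_replicate n) (by omega)
  induction k with
  | zero =>
    intro a b
    rw [List.range'_zero, List.foldl_nil,
        pvGet_set n _ 0 0 _ (pvShape_replicate n) (by omega) (by omega) a b]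
    by_cases hab : a = 0 ∧ b = 0
    · obtain ⟨rfl, rfl⟩ := hab
      rw [pvDP_eq_00]
      unfold pvDstep
      split_ifs <;> omega
    · rw [if_neg hab, if_neg hab, if_neg (by omega), if_neg (by omega), pvGet_replicate]
  | succ k ih =>
    intro a b
    have hk' : k < n := by omega
    have ih := ih hk'
    have hshapeH : pvShape n ((List.range' 1 k).foldl (pvBorderBody t p)
        (pvSet (List.replicate n (List.replicate n 0)) 0 0
          (if PySem.Int.mod (t 0 0) p = 0 then t 0 0 else 0))) :=
      pvShape_foldl n _ _ (fun g i hi hg =>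
        pvShape_borderBody t p n i (by
          have := List.mem_range'_1.mp hi
          omega) g hg hn) _ hshape1
    rw [pv_range'_concat k, List.foldl_append, List.foldl_cons, List.foldl_nil]
    have hk0 : pvGet ((List.range' 1 k).foldl (pvBorderBody t p)
        (pvSet (List.replicate n (List.replicate n 0)) 0 0
          (if PySem.Int.mod (t 0 0) p = 0 then t 0 0 else 0))) k 0 = pvDP t p comb k 0 := by
      rw [ih k 0]
      rcases k with _ | k
      · rw [if_pos ⟨rfl, rfl⟩]
      · rw [if_neg (by omega), if_pos ⟨rfl, by omega, le_refl _⟩]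
    have h0k : pvGet ((List.range' 1 k).foldl (pvBorderBody t p)
        (pvSet (List.replicate n (List.replicate n 0)) 0 0
          (if PySem.Int.mod (t 0 0) p = 0 then t 0 0 else 0))) 0 k = pvDP t p comb 0 k := by
      rw [ih 0 k]
      rcases k with _ | k
      · rw [if_pos ⟨rfl, rfl⟩]
      · rw [if_neg (by omega), if_neg (by omega), if_pos ⟨rfl, by omega, le_refl _⟩]
    simp only [pvBorderBody, Nat.add_sub_cancel]
    rw [pvGet_set n _ 0 (k+1) _ (pvShape_set n _ (k+1) 0 _ hshapeH hk) (by omega) hk a b,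
        pvGet_set n _ (k+1) 0 _ hshapeH hk (by omega) 0 k,
        if_neg (by omega : ¬ ((0:Nat) = k + 1 ∧ k = 0))]
    by_cases h2 : a = 0 ∧ b = k + 1
    · obtain ⟨rfl, rfl⟩ := h2
      rw [if_pos ⟨rfl, rfl⟩, h0k]
      rw [if_neg (by omega), if_neg (by omega), if_pos ⟨rfl, by omega, le_refl _⟩,
          pvDP_eq_0S]
    · rw [if_neg h2, pvGet_set n _ (k+1) 0 _ hshapeH hk (by omega) a b]
      by_cases h3 : a = k + 1 ∧ b = 0
      · obtain ⟨rfl, rfl⟩ := h3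
        rw [if_pos ⟨rfl, rfl⟩, hk0]
        rw [if_neg (by omega), if_pos ⟨rfl, by omega, le_refl _⟩, pvDP_eq_S0]
      · rw [if_neg h3, ih a b]
        split_ifs <;> first | rfl | omega

-- characterization of one max/min pass's inner loop (row i, columns 1..k)
theorem pv_inner_char (t : Nat → Nat → Int) (p : Int) (comb : Int → Int → Int)
    (g : List (List Int)) (n m i : Nat) (hm : m < n) (hi : 1 ≤ i) (hin : i < n)
    (hshape : pvShape n g)
    (hcol : pvGet g i 0 = pvDP t p comb i 0)
    (hup : ∀ j, j ≤ m → pvGet g (i-1) j = pvDP t p comb (i-1) j) :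
    ∀ k, k ≤ m → ∀ a b, pvGet ((List.range' 1 k).foldl (pvCellBody t p comb i) g) a b =
      if a = i ∧ 1 ≤ b ∧ b ≤ k then pvDP t p comb a b else pvGet g a b := by
  intro k
  induction k with
  | zero =>
    intro _ a b
    rw [List.range'_zero, List.foldl_nil, if_neg (by omega)]
  | succ k ih =>
    intro hk a b
    rw [pv_range'_concat k, List.foldl_append, List.foldl_cons, List.foldl_nil]
    have hk' : k ≤ m := by omega
    have hshapeH : pvShape n ((List.range' 1 k).foldl (pvCellBody t p comb i) g) :=
      pvShape_foldl n _ _ (fun g' j _ hg' => pvShape_cellBody t p comb n i j hin g' hg')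
        g hshape
    obtain ⟨i', rfl⟩ : ∃ i', i = i' + 1 := ⟨i - 1, by omega⟩
    have hread1 : pvGet ((List.range' 1 k).foldl (pvCellBody t p comb (i'+1)) g)
        ((i'+1)-1) (k+1) = pvDP t p comb i' (k+1) := by
      rw [ih hk' ((i'+1)-1) (k+1), if_neg (by omega)]
      have h := hup (k+1) (by omega)
      simpa using h
    have hread2 : pvGet ((List.range' 1 k).foldl (pvCellBody t p comb (i'+1)) g)
        (i'+1) k = pvDP t p comb (i'+1) k := by
      rw [ih hk' (i'+1) k]
      rcases Nat.eq_zero_or_pos k with rfl | hkpos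
      · rw [if_neg (by omega)]; exact hcol
      · rw [if_pos ⟨rfl, hkpos, le_refl k⟩]
    simp only [pvCellBody, Nat.add_sub_cancel] at hread1 hread2 ⊢
    rw [pvGet_set n _ (i'+1) (k+1) _ hshapeH hin (by omega) a b, hread1, hread2]
    by_cases hab : a = i' + 1 ∧ b = k + 1
    · obtain ⟨rfl, rfl⟩ := hab
      rw [if_pos ⟨rfl, rfl⟩, if_pos ⟨rfl, by omega, le_refl _⟩, pvDP_eq_SS]
    · rw [if_neg hab, ih hk' a b]
      split_ifs <;> first | rfl | omega

-- characterization of a whole max/min pass (rows 1..r), given correct borders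
theorem pv_pass_char (t : Nat → Nat → Int) (p : Int) (comb : Int → Int → Int)
    (g : List (List Int)) (n m : Nat) (hm : m < n) (hshape : pvShape n g)
    (hb : ∀ i, i ≤ m → pvGet g i 0 = pvDP t p comb i 0 ∧ pvGet g 0 i = pvDP t p comb 0 i) :
    ∀ r, r ≤ m → ∀ a b, pvGet ((List.range' 1 r).foldl (pvPassBody t p comb m) g) a b =
      if 1 ≤ a ∧ a ≤ r ∧ 1 ≤ b ∧ b ≤ m then pvDP t p comb a b else pvGet g a b := by
  intro r
  induction r with
  | zero =>
    intro _ a b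
    rw [List.range'_zero, List.foldl_nil, if_neg (by omega)]
  | succ r ih =>
    intro hr a b
    rw [pv_range'_concat r, List.foldl_append, List.foldl_cons, List.foldl_nil]
    have hr' : r ≤ m := by omega
    have hshapeH : pvShape n ((List.range' 1 r).foldl (pvPassBody t p comb m) g) :=
      pvShape_foldl n _ _ (fun g' i hi hg' =>
        pvShape_passBody t p comb n m i (by
          have := List.mem_range'_1.mp hi
          omega) g' hg') g hshape
    have hhcol : pvGet ((List.range' 1 r).foldl (pvPassBody t p comb m) g) (r+1) 0 =
        pvDP t p comb (r+1) 0 := by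
      rw [ih hr' (r+1) 0, if_neg (by omega)]
      exact (hb (r+1) hr).1
    have hhup : ∀ j, j ≤ m →
        pvGet ((List.range' 1 r).foldl (pvPassBody t p comb m) g) ((r+1)-1) j =
        pvDP t p comb ((r+1)-1) j := by
      intro j hj
      simp only [Nat.add_sub_cancel]
      rw [ih hr' r j]
      rcases Nat.eq_zero_or_pos r with rfl | hrpos
      · rw [if_neg (by omega)]
        exact (hb j hj).2
      · rcases Nat.eq_zero_or_pos j with rfl | hjpos
        · rw [if_neg (by omega)]
          exact (hb r hr').1
        · rw [if_pos ⟨hrpos, le_refl r, hjpos, hj⟩]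
    have hinner := pv_inner_char t p comb ((List.range' 1 r).foldl (pvPassBody t p comb m) g)
      n m (r+1) hm (by omega) (by omega) hshapeH hhcol hhup m (le_refl m) a b
    show pvGet (pvPassBody t p comb m ((List.range' 1 r).foldl (pvPassBody t p comb m) g) (r+1))
      a b = _
    rw [pvPassBody, hinner, ih hr' a b]
    split_ifs <;> first | rfl | omega

-- A returns the two DP corners
theorem pv_A_eq (table : List (List Int)) (a_o_l : Int) (psih : Int) (h1 : 1 ≤ a_o_l) :
    solution_medium table a_o_l psih =
      [pvDP (pvT table) psih max (a_o_l.toNat - 1) (a_o_l.toNat - 1),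
       pvDP (pvT table) psih min (a_o_l.toNat - 1) (a_o_l.toNat - 1)] := by
  have hn1 : 1 ≤ a_o_l.toNat := by omega
  set n := a_o_l.toNat with hn
  set t := pvT table with ht
  set m := n - 1 with hm
  have hmn : m < n := by omega
  set g1 := pvSet (List.replicate n (List.replicate n 0)) 0 0
    (if PySem.Int.mod (t 0 0) psih = 0 then t 0 0 else 0) with hg1
  set g2 := (List.range' 1 m).foldl (pvBorderBody t psih) g1 with hg2
  set g3 := (List.range' 1 m).foldl (pvPassBody t psih max m) g2 with hg3
  set g4 := (List.range' 1 m).foldl (pvPassBody t psih min m) g3 with hg4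
  have hAdef : solution_medium table a_o_l psih = [pvGet g3 (n-1) (n-1), pvGet g4 (n-1) (n-1)] :=
    rfl
  have hshape1 : pvShape n g1 := pvShape_set n _ 0 0 _ (pvShape_replicate n) (by omega)
  have hshape2 : pvShape n g2 := by
    rw [hg2]
    exact pvShape_foldl n _ _ (fun g i hi hg =>
      pvShape_borderBody t psih n i (by
        have := List.mem_range'_1.mp hi
        omega) g hg hn1) g1 hshape1
  have hshape3 : pvShape n g3 := by
    rw [hg3]
    exact pvShape_foldl n _ _ (fun g i hi hg =>
      pvShape_passBody t psih max n m i (by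
        have := List.mem_range'_1.mp hi
        omega) g hg) g2 hshape2
  have hg2c : ∀ (comb : Int → Int → Int) a b, a ≤ m → b ≤ m → (a = 0 ∨ b = 0) →
      pvGet g2 a b = pvDP t psih comb a b := by
    intro comb a b ha hb hor
    rw [hg2, hg1, pv_border_char t psih comb n hn1 m hmn a b]
    rcases hor with rfl | rfl
    · rcases Nat.eq_zero_or_pos b with rfl | hbpos
      · rw [if_pos ⟨rfl, rfl⟩]
      · rw [if_neg (by omega), if_neg (by omega), if_pos ⟨rfl, hbpos, hb⟩]
    · rcases Nat.eq_zero_or_pos a with rfl | hapos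
      · rw [if_pos ⟨rfl, rfl⟩]
      · rw [if_neg (by omega), if_pos ⟨rfl, hapos, ha⟩]
  have hg3c : ∀ a b, pvGet g3 a b =
      if 1 ≤ a ∧ a ≤ m ∧ 1 ≤ b ∧ b ≤ m then pvDP t psih max a b else pvGet g2 a b := by
    intro a b
    rw [hg3, pv_pass_char t psih max g2 n m hmn hshape2
      (fun i hi => ⟨hg2c max i 0 hi (by omega) (Or.inr rfl), hg2c max 0 i (by omega) hi (Or.inl rfl)⟩)
      m (le_refl m) a b]
  have hg3corner : pvGet g3 (n-1) (n-1) = pvDP t psih max (n-1) (n-1) := by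
    rw [hg3c]
    rcases Nat.lt_or_ge 1 n with h2 | h2
    · rw [if_pos ⟨by omega, by omega, by omega, by omega⟩]
    · have hone : n = 1 := by omega
      rw [if_neg (by omega)]
      rw [hone]
      exact hg2c max 0 0 (by omega) (by omega) (Or.inl rfl)
  have hg3b : ∀ i, i ≤ m →
      pvGet g3 i 0 = pvDP t psih min i 0 ∧ pvGet g3 0 i = pvDP t psih min 0 i := by
    intro i hi
    constructor
    · rw [hg3c, if_neg (by omega)]
      exact hg2c min i 0 hi (by omega) (Or.inr rfl)
    · rw [hg3c, if_neg (by omega)]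
      exact hg2c min 0 i (by omega) hi (Or.inl rfl)
  have hg4corner : pvGet g4 (n-1) (n-1) = pvDP t psih min (n-1) (n-1) := by
    rw [hg4, pv_pass_char t psih min g3 n m hmn hshape3 hg3b m (le_refl m) (n-1) (n-1)]
    rcases Nat.lt_or_ge 1 n with h2 | h2
    · rw [if_pos ⟨by omega, by omega, by omega, by omega⟩]
    · have hone : n = 1 := by omega
      rw [if_neg (by omega)]
      rw [hone, hg3c, if_neg (by omega)]
      exact hg2c min 0 0 (by omega) (by omega) (Or.inl rfl)
  rw [hAdef, hg3corner, hg4corner]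

-- B's cells
def pvCellSpec (t : Nat → Nat → Int) (p : Int) (i j : Nat) : Int × Int :=
  (pvDP t p max i j, pvDP t p min i j)

-- characterization of B's inner loop: it builds the row of (max, min) pairs
theorem pv_brow_char (t : Nat → Nat → Int) (p : Int) (n i : Nat) (prev : List (Int × Int))
    (hprev : i = 0 ∨ (1 ≤ i ∧ i ≤ n ∧ ∀ j, j < n → prev.getD j (0,0) = pvCellSpec t p (i-1) j)) :
    ∀ k, k ≤ n → ((List.range k).foldl (fun row j => row ++ [pvBCell t p i prev row j]) []) =
      (List.range k).map (pvCellSpec t p i) := by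
  intro k
  induction k with
  | zero => intro _; simp
  | succ k ih =>
    intro hk
    have hk' : k ≤ n := by omega
    rw [List.range_succ, List.foldl_append, List.foldl_cons, List.foldl_nil, ih hk',
        List.map_append, List.map_cons, List.map_nil]
    congr 1
    have hrowget : ∀ j, j < k → ((List.range k).map (pvCellSpec t p i)).getD j (0,0) =
        pvCellSpec t p i j := by
      intro j hj
      rw [List.getD_eq_getElem?_getD]
      simp [hj]
    rcases Nat.eq_zero_or_pos i with rfl | hipos
    · rcases Nat.eq_zero_or_pos k with rfl | hkpos
      · unfold pvBCell
        rw [if_pos ⟨rfl, rfl⟩]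
        simp only [pvCellSpec, pvDP_eq_00, pvDstep]
        split_ifs <;> simp
      · obtain ⟨k', rfl⟩ : ∃ k', k = k' + 1 := ⟨k - 1, by omega⟩
        unfold pvBCell
        rw [if_neg (show ¬((0:Nat) = 0 ∧ (k'+1:Nat) = 0) from by omega),
            if_pos (rfl : (0:Nat) = 0)]
        simp only [Nat.add_sub_cancel]
        rw [hrowget k' (by omega)]
        simp only [pvCellSpec, pvDP_eq_0S, pvDstep]
        split_ifs <;> rfl
    · obtain ⟨hi1, hin, hpr⟩ := hprev.resolve_left (by omega)
      obtain ⟨i', rfl⟩ : ∃ i', i = i' + 1 := ⟨i - 1, by omega⟩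
      rcases Nat.eq_zero_or_pos k with rfl | hkpos
      · unfold pvBCell
        rw [if_neg (show ¬((i'+1:Nat) = 0 ∧ (0:Nat) = 0) from by omega),
            if_neg (show ¬(i'+1:Nat) = 0 from by omega), if_pos (rfl : (0:Nat) = 0)]
        rw [hpr 0 (by omega)]
        simp only [Nat.add_sub_cancel, pvCellSpec, pvDP_eq_S0, pvDstep]
        split_ifs <;> rfl
      · obtain ⟨k', rfl⟩ : ∃ k', k = k' + 1 := ⟨k - 1, by omega⟩
        unfold pvBCell
        rw [if_neg (show ¬((i'+1:Nat) = 0 ∧ (k'+1:Nat) = 0) from by omega),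
            if_neg (show ¬(i'+1:Nat) = 0 from by omega),
            if_neg (show ¬(k'+1:Nat) = 0 from by omega)]
        rw [hpr (k'+1) (by omega)]
        simp only [Nat.add_sub_cancel]
        rw [hrowget k' (by omega)]
        simp only [pvCellSpec, pvDP_eq_SS, pvDstep]
        split_ifs <;> rfl

-- characterization of B's outer loop after m ≥ 1 rows
theorem pv_bfold_char (t : Nat → Nat → Int) (p : Int) (n : Nat) :
    ∀ m, 1 ≤ m → m ≤ n →
      ((List.range m).foldl
        (fun prev i => (List.range n).foldl (fun row j => row ++ [pvBCell t p i prev row j]) []) []) =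
      (List.range n).map (pvCellSpec t p (m-1)) := by
  intro m
  induction m with
  | zero => intro h; omega
  | succ m ih =>
    intro _ hm
    rw [List.range_succ, List.foldl_append, List.foldl_cons, List.foldl_nil]
    rcases Nat.eq_zero_or_pos m with rfl | hmpos
    · exact pv_brow_char t p n 0 [] (Or.inl rfl) n (le_refl n)
    · rw [ih hmpos (by omega)]
      have hget : ∀ j, j < n → ((List.range n).map (pvCellSpec t p (m-1))).getD j (0,0) =
          pvCellSpec t p (m-1) j := by
        intro j hj
        rw [List.getD_eq_getElem?_getD]
        simp [hj]
      have h := pv_brow_char t p n m ((List.range n).map (pvCellSpec t p (m-1)))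
        (Or.inr ⟨hmpos, by omega, hget⟩) n (le_refl n)
      rw [h]
      simp

-- B returns the two DP corners
theorem pv_B_eq (table : List (List Int)) (a_o_l : Int) (psih : Int) (h1 : 1 ≤ a_o_l) :
    solution_medium_alt table a_o_l psih =
      [pvDP (pvT table) psih max (a_o_l.toNat - 1) (a_o_l.toNat - 1),
       pvDP (pvT table) psih min (a_o_l.toNat - 1) (a_o_l.toNat - 1)] := by
  have hn1 : 1 ≤ a_o_l.toNat := by omega
  set n := a_o_l.toNat with hn
  set t := pvT table with ht
  set last := (List.range n).foldl
    (fun prev i => (List.range n).foldl (fun row j => row ++ [pvBCell t psih i prev row j]) []) []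
    with hlastdef
  have hBdef : solution_medium_alt table a_o_l psih =
      [(PySem.List.pyGetD last (-1) (0,0)).1, (PySem.List.pyGetD last (-1) (0,0)).2] := rfl
  have hfold : last = (List.range n).map (pvCellSpec t psih (n-1)) :=
    pv_bfold_char t psih n n hn1 (le_refl n)
  have hne : ((List.range n).map (pvCellSpec t psih (n-1))) ≠ [] := by
    simp only [ne_eq, List.map_eq_nil_iff, List.range_eq_nil]
    omega
  have hlastget : PySem.List.pyGetD last (-1) (0,0) = pvCellSpec t psih (n-1) (n-1) := by
    rw [hfold, PySem.List.pyGetD_neg_one _ _ hne, List.getLast_eq_getElem]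
    simp only [List.length_map, List.length_range, List.getElem_map, List.getElem_range]
  rw [hBdef, hlastget]
  rfl

-- ===== VERDICT (by name: the statement is the Claim_ definition above) =====
theorem solution_medium_spec : Claim_equal_solution_medium := by
  intro table a_o_l psih _ hpre
  unfold Spec_solution_medium
  rw [pv_A_eq table a_o_l psih hpre.2.1, pv_B_eq table a_o_l psih hpre.2.1]
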